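-- pv_equiv track=rewrite | github.com/edgaytanc/sistema-audita | auditoria/processors/excel/processor_anual_semestral/data_extraction.py | _clasificar_cuentas_por_seccion
-- ===== SOURCE A (Python) =====
-- def _clasificar_cuentas_por_seccion(balances, tipo_balance):
--     """Clasifica las cuentas del balance por sección para un tipo de balance específico."""
--     cuentas_por_seccion = {
--         'Activo': [],
--         'Pasivo': [],
--         'Patrimonio': [],
--         'ESTADO DE RESULTADOS': []
--     }
--     cuentas_vistas = set()
--
--     for clave in balances.keys():
--         partes = clave.split('-')
--         if len(partes) >= 5 and partes[0] == tipo_balance: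
--             seccion = partes[4]
--             cuenta = '-'.join(partes[5:])
--             if seccion in cuentas_por_seccion and cuenta not in cuentas_vistas:
--                 cuentas_por_seccion[seccion].append(cuenta)
--                 cuentas_vistas.add(cuenta)
--
--     for seccion in cuentas_por_seccion:
--         cuentas_por_seccion[seccion].sort()
--
--     return cuentas_por_seccion
-- ===== SOURCE B (Python) =====
-- def _clasificar_cuentas_por_seccion(balances, tipo_balance):
--     """Sort-scan-partition: gather (cuenta, index, seccion) candidates, sort once by
--     (cuenta, index), dedup adjacent equal cuentas (smallest index wins = first valid
--     occurrence), and emit into the four section lists, already in sorted order."""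
--     secciones = ('Activo', 'Pasivo', 'Patrimonio', 'ESTADO DE RESULTADOS')
--     candidatos = []
--     for i, clave in enumerate(balances):
--         partes = clave.split('-')
--         if len(partes) >= 5 and partes[0] == tipo_balance and partes[4] in secciones:
--             candidatos.append(('-'.join(partes[5:]), i, partes[4]))
--     candidatos.sort(key=lambda t: (t[0], t[1]))
--     resultado = {s: [] for s in secciones}
--     prev = None
--     for cuenta, _i, seccion in candidatos:
--         if cuenta != prev:
--             resultado[seccion].append(cuenta)
--             prev = cuenta
--     return resultado
-- ===== Notes on version B (the rewrite author's own statement) =====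
-- stated objective: alternative
-- what changed: A does one filtered pass keeping four per-section lists plus a global seen-set and then sorts each list; B collects (cuenta, index, seccion) candidate triples, sorts them once by (cuenta, index), dedups adjacent equal cuentas with a prev scan (the smallest index, i.e. the first valid occurrence, wins), and partitions into the four section lists, which come out already sorted with no per-section sort and no seen-set.
import Mathlib
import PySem

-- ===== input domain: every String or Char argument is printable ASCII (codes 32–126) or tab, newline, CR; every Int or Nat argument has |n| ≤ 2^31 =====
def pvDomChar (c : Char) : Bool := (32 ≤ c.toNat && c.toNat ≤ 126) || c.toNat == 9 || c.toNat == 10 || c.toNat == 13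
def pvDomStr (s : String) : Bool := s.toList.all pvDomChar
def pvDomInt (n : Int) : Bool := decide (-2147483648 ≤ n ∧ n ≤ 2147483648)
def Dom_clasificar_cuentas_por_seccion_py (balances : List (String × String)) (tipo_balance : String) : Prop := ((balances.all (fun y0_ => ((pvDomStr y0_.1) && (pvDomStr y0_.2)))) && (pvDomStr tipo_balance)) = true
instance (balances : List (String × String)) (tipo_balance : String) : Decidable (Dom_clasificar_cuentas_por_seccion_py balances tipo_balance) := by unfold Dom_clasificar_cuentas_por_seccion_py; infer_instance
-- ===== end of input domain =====

-- B replaces A's one-pass grouping (four per-section lists + a global seen-set, then a sort of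
-- each list) by sort-scan-partition: candidate (cuenta, index, seccion) triples are sorted once
-- by (cuenta, index), adjacent equal cuentas are deduped by a prev-scan, and the scan emits each
-- cuenta — already in sorted order — into its section list (objective: alternative).

-- ===== PORT A =====
-- the four fixed keys of A's result dict (its key set never changes)
def pvSecNames : List String := ["Activo", "Pasivo", "Patrimonio", "ESTADO DE RESULTADOS"]

-- cuentas_por_seccion[sec].append(cuenta) on the fixed four-key dict, as a 4-tuple of lists
def pvAppend4 (q : List String × List String × List String × List String) (sec cuenta : String) :
    List String × List String × List String × List String :=
  if sec = "Activo" then (q.1 ++ [cuenta], q.2.1, q.2.2.1, q.2.2.2)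
  else if sec = "Pasivo" then (q.1, q.2.1 ++ [cuenta], q.2.2.1, q.2.2.2)
  else if sec = "Patrimonio" then (q.1, q.2.1, q.2.2.1 ++ [cuenta], q.2.2.2)
  else (q.1, q.2.1, q.2.2.1, q.2.2.2 ++ [cuenta])

-- one iteration of A's loop over balances.keys()
def pvAStep (tipo : String)
    (st : (List String × List String × List String × List String) × PySem.Set String)
    (clave : String) : (List String × List String × List String × List String) × PySem.Set String :=
  let partes := (PySem.Str.split? clave "-").getD []
  if 5 ≤ partes.length ∧ partes.getD 0 "" = tipo then
    let seccion := partes.getD 4 ""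
    let cuenta := PySem.Str.join "-" (partes.drop 5)
    if seccion ∈ pvSecNames ∧ cuenta ∉ st.2 then
      (pvAppend4 st.1 seccion cuenta, PySem.Set.add st.2 cuenta)
    else st
  else st

def clasificar_cuentas_por_seccion_py (balances : List (String × String)) (tipo_balance : String) :
    List (String × List String) :=
  let st := balances.foldl (fun st p => pvAStep tipo_balance st p.1) (([], [], [], []), PySem.Set.empty)
  [("Activo", PySem.List.sorted st.1.1 (fun x => x) false),
   ("Pasivo", PySem.List.sorted st.1.2.1 (fun x => x) false),
   ("Patrimonio", PySem.List.sorted st.1.2.2.1 (fun x => x) false),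
   ("ESTADO DE RESULTADOS", PySem.List.sorted st.1.2.2.2 (fun x => x) false)]

-- ===== PORT B =====
-- B's first loop: 'for i, clave in enumerate(balances): … candidatos.append((cuenta, i, seccion))'
def pvBCand (tipo : String) (keys : List String) : List (String × Int × String) :=
  (PySem.List.enumerate keys 0).foldl
    (fun acc p =>
      let partes := (PySem.Str.split? p.2 "-").getD []
      if 5 ≤ partes.length ∧ partes.getD 0 "" = tipo ∧ partes.getD 4 "" ∈ pvSecNames then
        acc ++ [(PySem.Str.join "-" (partes.drop 5), p.1, partes.getD 4 "")]
      else acc) []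

-- B's scan: 'if cuenta != prev: resultado[seccion].append(cuenta); prev = cuenta'
def pvBScanStep
    (st : (List String × List String × List String × List String) × Option String)
    (t : String × Int × String) :
    (List String × List String × List String × List String) × Option String :=
  if some t.1 ≠ st.2 then (pvAppend4 st.1 t.2.2 t.1, some t.1) else st

def clasificar_cuentas_por_seccion_py_alt (balances : List (String × String)) (tipo_balance : String) :
    List (String × List String) :=
  let cand := pvBCand tipo_balance (balances.map Prod.fst)
  let s := PySem.List.sorted2 cand (fun t => t.1) (fun t => t.2.1)
  let st := s.foldl pvBScanStep (([], [], [], []), none)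
  [("Activo", st.1.1), ("Pasivo", st.1.2.1), ("Patrimonio", st.1.2.2.1),
   ("ESTADO DE RESULTADOS", st.1.2.2.2)]

-- ===== PRECONDITION & SPEC =====
def Spec_clasificar_cuentas_por_seccion_py (balances : List (String × String)) (tipo_balance : String) (out : List (String × List String)) : Prop := out = clasificar_cuentas_por_seccion_py_alt balances tipo_balance
instance (balances : List (String × String)) (tipo_balance : String) (out : List (String × List String)) : Decidable (Spec_clasificar_cuentas_por_seccion_py balances tipo_balance out) := by unfold Spec_clasificar_cuentas_por_seccion_py; infer_instance

-- ===== CLAIM (what is proved, stated in full; the proofs are below) =====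
def Claim_equal_clasificar_cuentas_por_seccion_py : Prop := ∀ (balances : List (String × String)) (tipo_balance : String), Dom_clasificar_cuentas_por_seccion_py balances tipo_balance → Spec_clasificar_cuentas_por_seccion_py balances tipo_balance (clasificar_cuentas_por_seccion_py balances tipo_balance)

-- ===== LEMMAS AND PROOFS =====

-- the candidate triples of a key list starting at index i, in recursive form
def pvCandR (tipo : String) : List String → Int → List (String × Int × String)
  | [], _ => []
  | k :: ks, i =>
    let partes := (PySem.Str.split? k "-").getD []
    if 5 ≤ partes.length ∧ partes.getD 0 "" = tipo ∧ partes.getD 4 "" ∈ pvSecNames then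
      (PySem.Str.join "-" (partes.drop 5), i, partes.getD 4 "") :: pvCandR tipo ks (i + 1)
    else pvCandR tipo ks (i + 1)

-- the entries whose cuenta was not seen before (first occurrence per cuenta)
def pvFirstsAux (s : List String) : List (String × Int × String) → List (String × Int × String)
  | [] => []
  | t :: l => if t.1 ∈ s then pvFirstsAux s l else t :: pvFirstsAux (s ++ [t.1]) l

-- the entries B's prev-scan keeps
def pvScanKept (p : Option String) : List (String × Int × String) → List (String × Int × String)
  | [] => []
  | t :: l => if some t.1 ≠ p then t :: pvScanKept (some t.1) l else pvScanKept p l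

-- the prev value after B's scan has processed a list
def pvPrevAfter (p : Option String) : List (String × Int × String) → Option String
  | [] => p
  | t :: l => pvPrevAfter (some t.1) l

-- "within one cuenta, indices strictly increase along the list"
def pvP (a b : String × Int × String) : Prop := a.1 = b.1 → a.2.1 < b.2.1

-- the (cuenta, index)-lexicographic order
def pvR (a b : String × Int × String) : Prop := a.1 < b.1 ∨ (a.1 = b.1 ∧ a.2.1 ≤ b.2.1)

-- the fold of pvAppend4 over a list of kept entries
def pvQuadFold (F : List (String × Int × String))
    (q : List String × List String × List String × List String) :
    List String × List String × List String × List String :=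
  F.foldl (fun q t => pvAppend4 q t.2.2 t.1) q

theorem pvBCand_aux (tipo : String) :
    ∀ (keys : List String) (i : Int) (acc : List (String × Int × String)),
    (PySem.List.enumerate keys i).foldl
      (fun acc p =>
        let partes := (PySem.Str.split? p.2 "-").getD []
        if 5 ≤ partes.length ∧ partes.getD 0 "" = tipo ∧ partes.getD 4 "" ∈ pvSecNames then
          acc ++ [(PySem.Str.join "-" (partes.drop 5), p.1, partes.getD 4 "")]
        else acc) acc = acc ++ pvCandR tipo keys i := by
  intro keys
  induction keys with
  | nil => intro i acc; simp [PySem.List.enumerate, pvCandR]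
  | cons k ks ih =>
      intro i acc
      rw [PySem.List.enumerate_cons, List.foldl_cons]
      unfold pvCandR
      by_cases h : 5 ≤ ((PySem.Str.split? k "-").getD []).length ∧
          ((PySem.Str.split? k "-").getD []).getD 0 "" = tipo ∧
          ((PySem.Str.split? k "-").getD []).getD 4 "" ∈ pvSecNames
      · simp only [if_pos h, ih, List.append_assoc, List.singleton_append]
      · simp only [if_neg h, ih]

theorem pvBCand_eq_candR (tipo : String) (keys : List String) :
    pvBCand tipo keys = pvCandR tipo keys 0 := by
  unfold pvBCand
  rw [pvBCand_aux]
  simp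

theorem pvA_loop (tipo : String) :
    ∀ (keys : List String) (i : Int)
      (q : List String × List String × List String × List String) (s : List String),
    keys.foldl (fun st k => pvAStep tipo st k) (q, s)
      = (pvQuadFold (pvFirstsAux s (pvCandR tipo keys i)) q,
         s ++ (pvFirstsAux s (pvCandR tipo keys i)).map (·.1)) := by
  intro keys
  induction keys with
  | nil => intro i q s; simp [pvCandR, pvFirstsAux, pvQuadFold]
  | cons k ks ih =>
      intro i q s
      rw [List.foldl_cons]
      unfold pvCandR
      by_cases h1 : 5 ≤ ((PySem.Str.split? k "-").getD []).length ∧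
          ((PySem.Str.split? k "-").getD []).getD 0 "" = tipo
      · by_cases h2 : ((PySem.Str.split? k "-").getD []).getD 4 "" ∈ pvSecNames
        · by_cases h3 : PySem.Str.join "-" (((PySem.Str.split? k "-").getD []).drop 5) ∈ s
          · -- already seen: A skips, the candidate is dropped by pvFirstsAux
            have hA : pvAStep tipo (q, s) k = (q, s) := by
              simp only [pvAStep]
              rw [if_pos h1, if_neg (by intro hx; exact hx.2 h3)]
            rw [hA, if_pos ⟨h1.1, h1.2, h2⟩]
            rw [show pvFirstsAux s ((PySem.Str.join "-" (((PySem.Str.split? k "-").getD []).drop 5), i,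
                  ((PySem.Str.split? k "-").getD []).getD 4 "") :: pvCandR tipo ks (i + 1))
                = pvFirstsAux s (pvCandR tipo ks (i + 1)) from by
              simp [pvFirstsAux, h3]]
            exact ih (i + 1) q s
          · -- new cuenta: A appends and records, pvFirstsAux keeps the candidate
            have hA : pvAStep tipo (q, s) k
                = (pvAppend4 q (((PySem.Str.split? k "-").getD []).getD 4 "")
                    (PySem.Str.join "-" (((PySem.Str.split? k "-").getD []).drop 5)),
                   s ++ [PySem.Str.join "-" (((PySem.Str.split? k "-").getD []).drop 5)]) := by
              simp only [pvAStep]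
              rw [if_pos h1, if_pos ⟨h2, h3⟩, PySem.Set.add_of_not_mem h3]
            rw [hA, if_pos ⟨h1.1, h1.2, h2⟩]
            rw [show pvFirstsAux s ((PySem.Str.join "-" (((PySem.Str.split? k "-").getD []).drop 5), i,
                  ((PySem.Str.split? k "-").getD []).getD 4 "") :: pvCandR tipo ks (i + 1))
                = (PySem.Str.join "-" (((PySem.Str.split? k "-").getD []).drop 5), i,
                    ((PySem.Str.split? k "-").getD []).getD 4 "") ::
                  pvFirstsAux (s ++ [PySem.Str.join "-" (((PySem.Str.split? k "-").getD []).drop 5)])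
                    (pvCandR tipo ks (i + 1)) from by
              simp [pvFirstsAux, h3]]
            rw [ih (i + 1)]
            simp [pvQuadFold, List.append_assoc]
        · -- invalid section: both skip
          have hA : pvAStep tipo (q, s) k = (q, s) := by
            simp only [pvAStep]
            rw [if_pos h1, if_neg (by intro hx; exact h2 hx.1)]
          rw [hA, if_neg (by intro hx; exact h2 hx.2.2)]
          exact ih (i + 1) q s
      · -- wrong tipo / too few parts: both skip
        have hA : pvAStep tipo (q, s) k = (q, s) := by
          simp only [pvAStep]
          rw [if_neg h1]
        rw [hA, if_neg (by intro hx; exact h1 ⟨hx.1, hx.2.1⟩)]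
        exact ih (i + 1) q s

theorem pvB_loop :
    ∀ (l : List (String × Int × String))
      (q : List String × List String × List String × List String) (p : Option String),
    l.foldl pvBScanStep (q, p) = (pvQuadFold (pvScanKept p l) q, pvPrevAfter p l) := by
  intro l
  induction l with
  | nil => intro q p; simp [pvScanKept, pvPrevAfter, pvQuadFold]
  | cons t l ih =>
      intro q p
      rw [List.foldl_cons]
      by_cases h : some t.1 ≠ p
      · rw [show pvBScanStep (q, p) t = (pvAppend4 q t.2.2 t.1, some t.1) from by
          simp only [pvBScanStep]; rw [if_pos h]]
        rw [ih]
        simp [pvScanKept, h, pvPrevAfter, pvQuadFold]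
      · simp only [ne_eq, not_not] at h
        rw [show pvBScanStep (q, p) t = (q, p) from by
          simp only [pvBScanStep]; rw [if_neg (by simp [h])]]
        rw [ih]
        simp [pvScanKept, pvPrevAfter, ← h]

theorem pvScan_eq_firsts :
    ∀ (l : List (String × Int × String)) (s : List String) (p : Option String),
    l.Pairwise (fun a b => a.1 ≤ b.1) →
    (∀ x ∈ s, ∀ t ∈ l, t.1 = x → p = some x) →
    (∀ c, p = some c → c ∈ s ∧ ∀ t ∈ l, c ≤ t.1) →
    pvScanKept p l = pvFirstsAux s l := by
  intro l
  induction l with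
  | nil => intro s p _ _ _; simp [pvScanKept, pvFirstsAux]
  | cons t l ih =>
      intro s p hsort hseen hprev
      rw [List.pairwise_cons] at hsort
      obtain ⟨hhead, htail⟩ := hsort
      by_cases h : some t.1 = p
      · obtain ⟨hcs, _⟩ := hprev t.1 h.symm
        rw [show pvScanKept p (t :: l) = pvScanKept p l from by
          simp [pvScanKept, h]]
        rw [show pvFirstsAux s (t :: l) = pvFirstsAux s l from by simp [pvFirstsAux, hcs]]
        exact ih s p htail
          (fun x hx u hu => hseen x hx u (List.mem_cons_of_mem _ hu))
          (fun c hc => ⟨(hprev c hc).1, fun u hu => (hprev c hc).2 u (List.mem_cons_of_mem _ hu)⟩)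
      · have hns : t.1 ∉ s := fun hin => h (hseen t.1 hin t (List.mem_cons_self) rfl).symm
        rw [show pvScanKept p (t :: l) = t :: pvScanKept (some t.1) l from by
          simp [pvScanKept, h]]
        rw [show pvFirstsAux s (t :: l) = t :: pvFirstsAux (s ++ [t.1]) l from by
          simp [pvFirstsAux, hns]]
        congr 1
        apply ih (s ++ [t.1]) (some t.1) htail
        · intro x hx u hu hux
          rcases List.mem_append.mp hx with hx' | hx'
          · have hp := hseen x hx' u (List.mem_cons_of_mem _ hu) hux
            have h1 : x ≤ t.1 := (hprev x hp).2 t (List.mem_cons_self)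
            have h2 : t.1 ≤ x := hux ▸ hhead u hu
            rw [le_antisymm h2 h1]
          · simp at hx'
            rw [hx']
        · intro c hc
          have : c = t.1 := by injection hc.symm
          subst this
          refine ⟨List.mem_append.mpr (Or.inr (by simp)), ?_⟩
          intro u hu
          exact hhead u hu

theorem pvFirsts_mem :
    ∀ (l : List (String × Int × String)) (s : List String) (t : String × Int × String),
    l.Pairwise pvP →
    (t ∈ pvFirstsAux s l ↔ t ∈ l ∧ t.1 ∉ s ∧ ∀ u ∈ l, u.1 = t.1 → t.2.1 ≤ u.2.1) := by
  intro l
  induction l with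
  | nil => intro s t _; simp [pvFirstsAux]
  | cons a l ih =>
      intro s t hp
      rw [List.pairwise_cons] at hp
      obtain ⟨ha, hp'⟩ := hp
      by_cases hin : a.1 ∈ s
      · rw [show pvFirstsAux s (a :: l) = pvFirstsAux s l from by simp [pvFirstsAux, hin]]
        rw [ih s t hp']
        constructor
        · rintro ⟨htl, hts, hmin⟩
          refine ⟨List.mem_cons_of_mem _ htl, hts, ?_⟩
          intro u hu
          rcases List.mem_cons.mp hu with rfl | hu'
          · intro hu1; exact (hts (hu1 ▸ hin)).elim
          · exact hmin u hu'
        · rintro ⟨htl, hts, hmin⟩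
          rcases List.mem_cons.mp htl with rfl | htl'
          · exact (hts hin).elim
          · exact ⟨htl', hts, fun u hu => hmin u (List.mem_cons_of_mem _ hu)⟩
      · rw [show pvFirstsAux s (a :: l) = a :: pvFirstsAux (s ++ [a.1]) l from by
          simp [pvFirstsAux, hin]]
        rw [List.mem_cons, ih (s ++ [a.1]) t hp']
        constructor
        · rintro (rfl | ⟨htl, hts, hmin⟩)
          · refine ⟨List.mem_cons_self, hin, ?_⟩
            intro u hu
            rcases List.mem_cons.mp hu with rfl | hu'
            · intro _; exact le_refl _
            · intro h1; exact le_of_lt (ha u hu' h1.symm)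
          · have hne : t.1 ≠ a.1 := fun e => hts (List.mem_append.mpr (Or.inr (by simp [e])))
            have hts' : t.1 ∉ s := fun hx => hts (List.mem_append.mpr (Or.inl hx))
            refine ⟨List.mem_cons_of_mem _ htl, hts', ?_⟩
            intro u hu
            rcases List.mem_cons.mp hu with rfl | hu'
            · intro h1; exact (hne h1.symm).elim
            · exact hmin u hu'
        · rintro ⟨hmem, hts, hmin⟩
          rcases List.mem_cons.mp hmem with rfl | htl'
          · exact Or.inl rfl
          · have hne : t.1 ≠ a.1 := by
              intro e
              have h1 : a.2.1 < t.2.1 := ha t htl' e.symm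
              have h2 : t.2.1 ≤ a.2.1 := hmin a (List.mem_cons_self) e.symm
              omega
            refine Or.inr ⟨htl', ?_, fun u hu => hmin u (List.mem_cons_of_mem _ hu)⟩
            intro hx
            rcases List.mem_append.mp hx with hx' | hx'
            · exact hts hx'
            · exact hne (by simpa using hx')

theorem pvFirsts_sublist (l : List (String × Int × String)) (s : List String) :
    (pvFirstsAux s l).Sublist l := by
  induction l generalizing s with
  | nil => simp [pvFirstsAux]
  | cons a l ih =>
      by_cases hin : a.1 ∈ s
      · rw [show pvFirstsAux s (a :: l) = pvFirstsAux s l from by simp [pvFirstsAux, hin]]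
        exact (ih s).trans (List.sublist_cons_self _ _)
      · rw [show pvFirstsAux s (a :: l) = a :: pvFirstsAux (s ++ [a.1]) l from by
          simp [pvFirstsAux, hin]]
        exact List.Sublist.cons₂ _ (ih _)

theorem pvFirsts_fst_nodup :
    ∀ (l : List (String × Int × String)) (s : List String),
    ((pvFirstsAux s l).map (·.1)).Nodup ∧ ∀ x ∈ (pvFirstsAux s l).map (·.1), x ∉ s := by
  intro l
  induction l with
  | nil => intro s; simp [pvFirstsAux]
  | cons a l ih =>
      intro s
      by_cases hin : a.1 ∈ s
      · rw [show pvFirstsAux s (a :: l) = pvFirstsAux s l from by simp [pvFirstsAux, hin]]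
        exact ih s
      · rw [show pvFirstsAux s (a :: l) = a :: pvFirstsAux (s ++ [a.1]) l from by
          simp [pvFirstsAux, hin]]
        obtain ⟨hnd, hnotin⟩ := ih (s ++ [a.1])
        constructor
        · rw [List.map_cons, List.nodup_cons]
          refine ⟨fun hx => ?_, hnd⟩
          exact hnotin a.1 hx (List.mem_append.mpr (Or.inr (by simp)))
        · intro x hx
          rw [List.map_cons, List.mem_cons] at hx
          rcases hx with rfl | hx'
          · exact hin
          · exact fun hs => hnotin x hx' (List.mem_append.mpr (Or.inl hs))

theorem pvCandR_idx_ge (tipo : String) :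
    ∀ (keys : List String) (i : Int) (t : String × Int × String),
    t ∈ pvCandR tipo keys i → i ≤ t.2.1 := by
  intro keys
  induction keys with
  | nil => intro i t ht; simp [pvCandR] at ht
  | cons k ks ih =>
      intro i t ht
      unfold pvCandR at ht
      by_cases h : 5 ≤ ((PySem.Str.split? k "-").getD []).length ∧
          ((PySem.Str.split? k "-").getD []).getD 0 "" = tipo ∧
          ((PySem.Str.split? k "-").getD []).getD 4 "" ∈ pvSecNames
      · rw [if_pos h] at ht
        rcases List.mem_cons.mp ht with rfl | ht'
        · exact le_refl _
        · have := ih (i + 1) t ht'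
          omega
      · rw [if_neg h] at ht
        have := ih (i + 1) t ht
        omega

theorem pvCandR_pairwise (tipo : String) :
    ∀ (keys : List String) (i : Int),
    (pvCandR tipo keys i).Pairwise (fun a b => a.2.1 < b.2.1) := by
  intro keys
  induction keys with
  | nil => intro i; simp [pvCandR]
  | cons k ks ih =>
      intro i
      unfold pvCandR
      by_cases h : 5 ≤ ((PySem.Str.split? k "-").getD []).length ∧
          ((PySem.Str.split? k "-").getD []).getD 0 "" = tipo ∧
          ((PySem.Str.split? k "-").getD []).getD 4 "" ∈ pvSecNames
      · rw [if_pos h]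
        refine List.Pairwise.cons ?_ (ih (i + 1))
        intro b hb
        have := pvCandR_idx_ge tipo ks (i + 1) b hb
        simpa using by omega
      · rw [if_neg h]
        exact ih (i + 1)

theorem pvCandR_sec (tipo : String) :
    ∀ (keys : List String) (i : Int) (t : String × Int × String),
    t ∈ pvCandR tipo keys i → t.2.2 ∈ pvSecNames := by
  intro keys
  induction keys with
  | nil => intro i t ht; simp [pvCandR] at ht
  | cons k ks ih =>
      intro i t ht
      unfold pvCandR at ht
      by_cases h : 5 ≤ ((PySem.Str.split? k "-").getD []).length ∧
          ((PySem.Str.split? k "-").getD []).getD 0 "" = tipo ∧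
          ((PySem.Str.split? k "-").getD []).getD 4 "" ∈ pvSecNames
      · rw [if_pos h] at ht
        rcases List.mem_cons.mp ht with rfl | ht'
        · exact h.2.2
        · exact ih (i + 1) t ht'
      · rw [if_neg h] at ht
        exact ih (i + 1) t ht

theorem pvPairwise_insertBy {α : Type} (bf : α → α → Bool) (R : α → α → Prop)
    (h1 : ∀ a b, bf a b = true → R a b) (h2 : ∀ a b, bf a b = false → R b a)
    (ht : ∀ a b c, R a b → R b c → R a c) :
    ∀ (l : List α) (x : α), l.Pairwise R → (PySem.List.insertBy bf x l).Pairwise R := by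
  intro l x
  induction l with
  | nil => intro _; simp [PySem.List.insertBy]
  | cons y ys ih =>
      intro hp
      rw [List.pairwise_cons] at hp
      obtain ⟨hy, hys⟩ := hp
      rw [show PySem.List.insertBy bf x (y :: ys)
          = if bf x y then x :: y :: ys else y :: PySem.List.insertBy bf x ys from rfl]
      by_cases hb : bf x y = true
      · rw [if_pos hb]
        refine List.Pairwise.cons ?_ (List.Pairwise.cons hy hys)
        intro b hb'
        rcases List.mem_cons.mp hb' with rfl | hb''
        · exact h1 _ _ hb
        · exact ht _ _ _ (h1 _ _ hb) (hy b hb'')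
      · rw [if_neg hb]
        refine List.Pairwise.cons ?_ (ih hys)
        intro b hb'
        rcases (PySem.List.mem_insertBy _ _ _ _).mp hb' with rfl | hb''
        · exact h2 _ _ (by simpa using hb)
        · exact hy b hb''

theorem pvPairwise_foldl_insertBy {α : Type} (bf : α → α → Bool) (R : α → α → Prop)
    (h1 : ∀ a b, bf a b = true → R a b) (h2 : ∀ a b, bf a b = false → R b a)
    (ht : ∀ a b c, R a b → R b c → R a c) :
    ∀ (l acc : List α), acc.Pairwise R →
    (l.foldl (fun acc x => PySem.List.insertBy bf x acc) acc).Pairwise R := by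
  intro l
  induction l with
  | nil => intro acc h; simpa using h
  | cons x xs ih =>
      intro acc h
      rw [List.foldl_cons]
      exact ih _ (pvPairwise_insertBy bf R h1 h2 ht _ _ h)

theorem pvSorted2_pairwise (l : List (String × Int × String)) :
    (PySem.List.sorted2 l (fun t => t.1) (fun t => t.2.1)).Pairwise pvR := by
  have heq : PySem.List.sorted2 l (fun t => t.1) (fun t => t.2.1)
      = l.foldl (fun acc x => PySem.List.insertBy
          (fun a b => decide (a.1 < b.1) || (!decide (b.1 < a.1) && decide (a.2.1 < b.2.1)))
          x acc) [] := rfl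
  rw [heq]
  apply pvPairwise_foldl_insertBy _ pvR _ _ _ _ _ List.Pairwise.nil
  · intro a b hb
    simp only [Bool.or_eq_true, Bool.and_eq_true, Bool.not_eq_true', decide_eq_true_eq,
      decide_eq_false_iff_not] at hb
    rcases hb with h | ⟨hnl, hlt⟩
    · exact Or.inl h
    · rcases lt_or_eq_of_le (not_lt.mp hnl) with h | h
      · exact Or.inl h
      · exact Or.inr ⟨h, le_of_lt hlt⟩
  · intro a b hb
    simp only [Bool.or_eq_false_iff, Bool.and_eq_false_iff, Bool.not_eq_false',
      decide_eq_true_eq, decide_eq_false_iff_not] at hb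
    obtain ⟨hnl, hr⟩ := hb
    rcases hr with h | h
    · exact Or.inl h
    · rcases lt_or_eq_of_le (not_lt.mp hnl) with h' | h'
      · exact Or.inl h'
      · exact Or.inr ⟨h', not_lt.mp h⟩
  · intro a b c hab hbc
    rcases hab with h | ⟨he, hle⟩
    · rcases hbc with h' | ⟨he', _⟩
      · exact Or.inl (lt_trans h h')
      · exact Or.inl (he' ▸ h)
    · rcases hbc with h' | ⟨he', hle'⟩
      · exact Or.inl (he ▸ h')
      · exact Or.inr ⟨he.trans he', le_trans hle hle'⟩

theorem pvQuadFold_eq :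
    ∀ (F : List (String × Int × String)), (∀ t ∈ F, t.2.2 ∈ pvSecNames) →
    ∀ (q : List String × List String × List String × List String),
    pvQuadFold F q
      = (q.1 ++ (F.filter (fun t => t.2.2 == "Activo")).map (·.1),
         q.2.1 ++ (F.filter (fun t => t.2.2 == "Pasivo")).map (·.1),
         q.2.2.1 ++ (F.filter (fun t => t.2.2 == "Patrimonio")).map (·.1),
         q.2.2.2 ++ (F.filter (fun t => t.2.2 == "ESTADO DE RESULTADOS")).map (·.1)) := by
  intro F
  induction F with
  | nil => intro _ q; simp [pvQuadFold]
  | cons t F ih =>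
      intro h q
      have hsec := h t (List.mem_cons_self)
      have hstep : pvQuadFold (t :: F) q = pvQuadFold F (pvAppend4 q t.2.2 t.1) := rfl
      rw [hstep, ih (fun u hu => h u (List.mem_cons_of_mem _ hu))]
      simp only [pvSecNames, List.mem_cons, List.not_mem_nil, or_false] at hsec
      rcases hsec with hs | hs | hs | hs <;>
        simp [pvAppend4, hs, List.append_assoc]

-- ===== VERDICT (by name: the statement is the Claim_ definition above) =====
theorem clasificar_cuentas_por_seccion_py_spec : Claim_equal_clasificar_cuentas_por_seccion_py := by
  intro balances tipo _
  show _ = _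
  simp only [clasificar_cuentas_por_seccion_py, clasificar_cuentas_por_seccion_py_alt]
  rw [pvBCand_eq_candR]
  rw [show balances.foldl (fun st p => pvAStep tipo st p.1) (([], [], [], []), PySem.Set.empty)
      = (balances.map Prod.fst).foldl (fun st k => pvAStep tipo st k)
          (([], [], [], []), ([] : List String)) from by rw [List.foldl_map]; rfl]
  rw [pvA_loop tipo (balances.map Prod.fst) 0, pvB_loop]
  have hSperm : (PySem.List.sorted2 (pvCandR tipo (balances.map Prod.fst) 0)
      (fun t => t.1) (fun t => t.2.1)).Perm (pvCandR tipo (balances.map Prod.fst) 0) :=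
    PySem.List.sorted2_perm _ _ _ _
  have hCP : (pvCandR tipo (balances.map Prod.fst) 0).Pairwise pvP := by
    have h := pvCandR_pairwise tipo (balances.map Prod.fst) 0
    exact h.imp (fun {a b} hab => (fun _ => hab : pvP a b))
  have hSR : (PySem.List.sorted2 (pvCandR tipo (balances.map Prod.fst) 0)
      (fun t => t.1) (fun t => t.2.1)).Pairwise pvR := pvSorted2_pairwise _
  have hCnd : ((pvCandR tipo (balances.map Prod.fst) 0).map (fun t => t.2.1)).Nodup := by
    have := List.pairwise_map.mpr ((pvCandR_pairwise tipo (balances.map Prod.fst) 0).imp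
      (fun {a b} h => (ne_of_lt h : a.2.1 ≠ b.2.1)))
    exact this.imp (fun h => h)
  have hSnd : ((PySem.List.sorted2 (pvCandR tipo (balances.map Prod.fst) 0)
      (fun t => t.1) (fun t => t.2.1)).map (fun t => t.2.1)).Nodup :=
    ((hSperm.map _).nodup_iff).mpr hCnd
  have hSP : (PySem.List.sorted2 (pvCandR tipo (balances.map Prod.fst) 0)
      (fun t => t.1) (fun t => t.2.1)).Pairwise pvP := by
    have hne := List.pairwise_map.mp hSnd
    exact (hSR.and hne).imp (fun {a b} h he => by
      rcases h.1 with h' | h'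
      · exact absurd (he ▸ h') (lt_irrefl _)
      · exact lt_of_le_of_ne h'.2 h.2)
  rw [pvScan_eq_firsts _ [] none (hSR.imp (fun {a b} h => by
      rcases h with h | h
      · exact le_of_lt h
      · exact le_of_eq h.1))
    (by intro x hx; cases hx) (by intro c hc; cases hc)]
  have hFBperm : (pvFirstsAux [] (PySem.List.sorted2 (pvCandR tipo (balances.map Prod.fst) 0)
      (fun t => t.1) (fun t => t.2.1))).Perm
      (pvFirstsAux [] (pvCandR tipo (balances.map Prod.fst) 0)) := by
    rw [List.perm_ext_iff_of_nodup
      ((pvFirsts_fst_nodup _ []).1.of_map _) ((pvFirsts_fst_nodup _ []).1.of_map _)]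
    intro t
    rw [pvFirsts_mem _ [] t hSP, pvFirsts_mem _ [] t hCP]
    constructor
    · rintro ⟨h1, h2, h3⟩
      exact ⟨hSperm.mem_iff.mp h1, h2, fun u hu => h3 u (hSperm.mem_iff.mpr hu)⟩
    · rintro ⟨h1, h2, h3⟩
      exact ⟨hSperm.mem_iff.mpr h1, h2, fun u hu => h3 u (hSperm.mem_iff.mp hu)⟩
  have hsecA : ∀ t ∈ pvFirstsAux [] (pvCandR tipo (balances.map Prod.fst) 0),
      t.2.2 ∈ pvSecNames := fun t ht =>
    pvCandR_sec tipo _ 0 t ((pvFirsts_sublist _ []).subset ht)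
  have hsecB : ∀ t ∈ pvFirstsAux [] (PySem.List.sorted2 (pvCandR tipo (balances.map Prod.fst) 0)
      (fun t => t.1) (fun t => t.2.1)), t.2.2 ∈ pvSecNames := fun t ht =>
    pvCandR_sec tipo _ 0 t (hSperm.subset ((pvFirsts_sublist _ []).subset ht))
  rw [pvQuadFold_eq _ hsecA, pvQuadFold_eq _ hsecB]
  have key : ∀ sec : String,
      PySem.List.sorted (((pvFirstsAux [] (pvCandR tipo (balances.map Prod.fst) 0)).filter
        (fun t => t.2.2 == sec)).map (fun t => t.1)) (fun x => x) false
      = ((pvFirstsAux [] (PySem.List.sorted2 (pvCandR tipo (balances.map Prod.fst) 0)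
          (fun t => t.1) (fun t => t.2.1))).filter (fun t => t.2.2 == sec)).map (fun t => t.1) := by
    intro sec
    apply PySem.List.sorted_eq_of_perm_of_pairwise_lt
    · exact (hFBperm.filter _).map _
    · have hRB := List.Pairwise.sublist (pvFirsts_sublist (PySem.List.sorted2
        (pvCandR tipo (balances.map Prod.fst) 0) (fun t => t.1) (fun t => t.2.1)) []) hSR
      have hnd := (pvFirsts_fst_nodup (PySem.List.sorted2 (pvCandR tipo (balances.map Prod.fst) 0)
        (fun t => t.1) (fun t => t.2.1)) []).1
      have hne := List.pairwise_map.mp hnd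
      have hlt : (pvFirstsAux [] (PySem.List.sorted2 (pvCandR tipo (balances.map Prod.fst) 0)
          (fun t => t.1) (fun t => t.2.1))).Pairwise (fun a b => a.1 < b.1) :=
        (hRB.and hne).imp (fun {a b} h => by
          rcases h.1 with h' | h'
          · exact h'
          · exact absurd h'.1 h.2)
      exact List.pairwise_map.mpr (List.Pairwise.sublist List.filter_sublist hlt)
  simp only [List.nil_append, key]
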